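-- pv_equiv track=rewrite | github.com/dlocke/nirvana-takehome | my_api/data_collector.py | _coalesce_by_majority_vote
-- ===== SOURCE A (Python) =====
-- def _coalesce_by_majority_vote(data):
--     result = {}
--     for category in data[0]:
--         values = {}
--         for row in data:
--             value = row[category]
--             if value in values:
--                 values[value] += 1
--             else:
--                 values[value] = 1
--
--         # Ties will go to the larger value
--         majority_value = 0
--         max_votes = 0
--
--         for v in values:
--             if values[v] > max_votes:
--                 majority_value = v
--                 max_votes = values[v]
--             elif values[v] == max_votes and v > majority_value:
--                 majority_value = v
--
--         result[category] = majority_value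
--
--     return result
-- ===== SOURCE B (Python) =====
-- def _coalesce_by_majority_vote(data):
--     result = {}
--     for category in data[0]:
--         vals = sorted(row[category] for row in data)
--         cur_val = None
--         cur_run = 0
--         best_val = 0
--         best_run = 0
--         for v in vals:
--             cur_run = cur_run + 1 if v == cur_val else 1
--             cur_val = v
--             if cur_run >= best_run:
--                 best_val = v
--                 best_run = cur_run
--         result[category] = best_val
--     return result
-- ===== Notes on version B (the rewrite author's own statement) =====
-- stated objective: alternative
-- what changed: B replaces A's per-category hash counting and sentinel selection loop with sort-and-scan: it sorts each category's column of values and scans the maximal runs of equal values, keeping the longest run with ties going to the later (larger) value, so no frequency dictionary is built at all.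
import Mathlib
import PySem

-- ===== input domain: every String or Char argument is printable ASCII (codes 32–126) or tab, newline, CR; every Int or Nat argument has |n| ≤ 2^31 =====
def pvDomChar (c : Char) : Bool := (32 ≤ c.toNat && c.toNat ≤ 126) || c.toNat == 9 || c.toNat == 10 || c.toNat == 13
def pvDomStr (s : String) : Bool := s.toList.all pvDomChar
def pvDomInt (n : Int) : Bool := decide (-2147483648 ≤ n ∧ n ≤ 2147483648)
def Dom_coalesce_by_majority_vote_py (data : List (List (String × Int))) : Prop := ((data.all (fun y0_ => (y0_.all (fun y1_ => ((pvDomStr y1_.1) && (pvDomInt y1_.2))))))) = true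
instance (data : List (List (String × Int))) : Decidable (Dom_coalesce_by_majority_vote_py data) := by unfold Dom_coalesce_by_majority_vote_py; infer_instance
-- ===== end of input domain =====

-- B replaces A's per-category hash counting + sentinel selection loop with sort-and-scan:
-- sort each category's column, scan its runs of equal values, keep the longest run with
-- ties to the later (larger) value ('alternative': different algorithm, similar cost).

-- ===== PORT A =====
def coalesce_by_majority_vote_py (data : List (List (String × Int))) : List (String × Int) :=
  let rows := data.map PySem.Dict.ofList
  let hd := rows.headD PySem.Dict.empty   -- data[0]; data = [] (IndexError) is excluded by Pre_
  (hd.keys.foldl (fun (result : PySem.Dict String Int) category =>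
    let values : PySem.Dict Int Int := rows.foldl (fun values row =>
      let value := (row.get? category).getD 0   -- row[category]; KeyError (none) excluded by Pre_
      if values.contains value then values.modify value 0 (· + 1)
      else values.insert value 1) PySem.Dict.empty
    let mm := values.keys.foldl (fun (p : Int × Int) v =>
      let c := values.getD v 0
      if c > p.2 then (v, c)
      else if c = p.2 ∧ v > p.1 then (v, p.2) else p) (0, 0)
    result.insert category mm.1) PySem.Dict.empty).items

-- ===== PORT B =====
-- the body of B's inner 'for v in vals' loop, carried as ((cur_val, cur_run), (best_val, best_run))
def pvScanStep (st : (Option Int × Int) × (Int × Int)) (v : Int) : (Option Int × Int) × (Int × Int) :=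
  let k := if some v = st.1.1 then st.1.2 + 1 else 1      -- cur_run = cur_run+1 if v == cur_val else 1
  if k ≥ st.2.2 then ((some v, k), (v, k)) else ((some v, k), st.2)

def coalesce_by_majority_vote_py_alt (data : List (List (String × Int))) : List (String × Int) :=
  let rows := data.map PySem.Dict.ofList
  ((rows.headD PySem.Dict.empty).keys.foldl (fun (result : PySem.Dict String Int) category =>
    let vals := PySem.List.sorted (rows.map (fun row => (row.get? category).getD 0)) (fun v => v) false
    let st := vals.foldl pvScanStep ((none, 0), (0, 0))
    result.insert category st.2.1) PySem.Dict.empty).items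

-- ===== PRECONDITION & SPEC =====
-- Pre_ excludes exactly the inputs where the Python A raises: data = [] (IndexError on data[0])
-- and rows missing a key of data[0] (KeyError on row[category]).
def Pre_coalesce_by_majority_vote_py (data : List (List (String × Int))) : Prop :=
  data ≠ [] ∧ ∀ row ∈ data, ∀ cat ∈ (PySem.Dict.ofList (data.headD [])).keys,
    (PySem.Dict.ofList row).contains cat = true
instance (data : List (List (String × Int))) : Decidable (Pre_coalesce_by_majority_vote_py data) := by
  unfold Pre_coalesce_by_majority_vote_py; infer_instance
def pvWitness_coalesce_by_majority_vote_py : (List (List (String × Int))) :=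
  [[("a", 1), ("b", 5)], [("a", 2), ("b", 5)], [("a", 2), ("b", 7)]]
def Spec_coalesce_by_majority_vote_py (data : List (List (String × Int))) (out : List (String × Int)) : Prop := out = coalesce_by_majority_vote_py_alt data
instance (data : List (List (String × Int))) (out : List (String × Int)) : Decidable (Spec_coalesce_by_majority_vote_py data out) := by unfold Spec_coalesce_by_majority_vote_py; infer_instance

-- ===== CLAIM (what is proved, stated in full; the proofs are below) =====
def Claim_equal_coalesce_by_majority_vote_py : Prop := ∀ (data : List (List (String × Int))), Dom_coalesce_by_majority_vote_py data → Pre_coalesce_by_majority_vote_py data → Spec_coalesce_by_majority_vote_py data (coalesce_by_majority_vote_py data)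

-- ===== LEMMAS AND PROOFS =====

-- r is the unique majority value of the multiset vals, ties to the larger value
def pvIsMaj (vals : List Int) (r : Int) : Prop :=
  r ∈ vals ∧ ∀ v ∈ vals, (vals.count v : Int) < vals.count r ∨ ((vals.count v : Int) = vals.count r ∧ v ≤ r)

theorem pvIsMaj_unique (vals : List Int) (r1 r2 : Int)
    (h1 : pvIsMaj vals r1) (h2 : pvIsMaj vals r2) : r1 = r2 := by
  rcases h1 with ⟨m1, b1⟩
  rcases h2 with ⟨m2, b2⟩
  rcases b1 r2 m2 with h | h <;> rcases b2 r1 m1 with h' | h' <;> omega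

theorem pvIsMaj_of_perm (s vals : List Int) (r : Int) (hp : s.Perm vals)
    (h : pvIsMaj s r) : pvIsMaj vals r := by
  rcases h with ⟨hm, hb⟩
  refine ⟨hp.mem_iff.mp hm, fun v hv => ?_⟩
  have := hb v (hp.mem_iff.mpr hv)
  rwa [hp.count_eq, hp.count_eq] at this

-- ---- A side: the sentinel selection loop over the counter keys ----
-- A's selection loop body, as a named function (definitionally the lambda in port A)
def pvSelStep (d : PySem.Dict Int Int) (p : Int × Int) (v : Int) : Int × Int :=
  if d.getD v 0 > p.2 then (v, d.getD v 0)
  else if d.getD v 0 = p.2 ∧ v > p.1 then (v, p.2) else p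

theorem pvSelA (d : PySem.Dict Int Int) (l : List Int) (mc : Int × Int) :
    (l.foldl (pvSelStep d) mc = mc ∨
      ((l.foldl (pvSelStep d) mc).1 ∈ l ∧
        (l.foldl (pvSelStep d) mc).2 = d.getD (l.foldl (pvSelStep d) mc).1 0))
    ∧ (mc.2 < (l.foldl (pvSelStep d) mc).2 ∨
        (mc.2 = (l.foldl (pvSelStep d) mc).2 ∧ mc.1 ≤ (l.foldl (pvSelStep d) mc).1))
    ∧ ∀ v ∈ l, d.getD v 0 < (l.foldl (pvSelStep d) mc).2 ∨
        (d.getD v 0 = (l.foldl (pvSelStep d) mc).2 ∧ v ≤ (l.foldl (pvSelStep d) mc).1) := by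
  induction l generalizing mc with
  | nil => exact ⟨Or.inl rfl, Or.inr ⟨rfl, le_refl mc.1⟩, by simp⟩
  | cons x t ih =>
      simp only [List.foldl_cons]
      have hstep : pvSelStep d mc x = mc ∨
          ((pvSelStep d mc x).1 = x ∧ (pvSelStep d mc x).2 = d.getD x 0) := by
        unfold pvSelStep
        split_ifs with h1 h2
        · exact Or.inr ⟨rfl, rfl⟩
        · exact Or.inr ⟨rfl, by simpa using h2.1.symm⟩
        · exact Or.inl rfl
      have hmono : mc.2 < (pvSelStep d mc x).2 ∨
          (mc.2 = (pvSelStep d mc x).2 ∧ mc.1 ≤ (pvSelStep d mc x).1) := by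
        unfold pvSelStep
        split_ifs with h1 h2
        · exact Or.inl (by simpa using h1)
        · exact Or.inr ⟨rfl, by simpa using le_of_lt h2.2⟩
        · exact Or.inr ⟨rfl, le_refl mc.1⟩
      have hx : d.getD x 0 < (pvSelStep d mc x).2 ∨
          (d.getD x 0 = (pvSelStep d mc x).2 ∧ x ≤ (pvSelStep d mc x).1) := by
        unfold pvSelStep
        split_ifs with h1 h2
        · exact Or.inr ⟨rfl, le_refl x⟩
        · exact Or.inr ⟨h2.1, le_refl x⟩
        · omega
      obtain ⟨q1, q2, q3⟩ := ih (pvSelStep d mc x)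
      refine ⟨?_, ?_, ?_⟩
      · rcases q1 with q1 | q1
        · rcases hstep with hs | hs
          · exact Or.inl (q1.trans hs)
          · refine Or.inr ⟨?_, ?_⟩
            · rw [q1, hs.1]; exact List.mem_cons_self
            · rw [q1, hs.2, hs.1]
        · exact Or.inr ⟨List.mem_cons_of_mem x q1.1, q1.2⟩
      · rcases hmono with hm' | hm' <;> rcases q2 with q2 | q2 <;> omega
      · intro v hv
        rcases List.mem_cons.mp hv with rfl | hv
        · rcases hx with hx | hx <;> rcases q2 with q2 | q2 <;> omega
        · exact q3 v hv

-- A's selection loop as a function of the counter dictionary (defeq to port A's loop)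
def pvSelect (d : PySem.Dict Int Int) : Int :=
  (d.keys.foldl (pvSelStep d) (0, 0)).1

theorem pvA_isMaj (vals : List Int) (hne : vals ≠ []) :
    pvIsMaj vals (pvSelect (PySem.Dict.counter vals)) := by
  obtain ⟨q1, -, q3⟩ := pvSelA (PySem.Dict.counter vals) (PySem.Dict.counter vals).keys (0, 0)
  rcases vals with _ | ⟨v0, vt⟩
  · exact absurd rfl hne
  have hv0 : v0 ∈ (PySem.Dict.counter (v0 :: vt)).keys := by
    rw [PySem.Dict.keys_counter]
    exact (PySem.Set.mem_ofList _ _).mpr List.mem_cons_self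
  unfold pvSelect
  rcases q1 with q1 | q1
  · exfalso
    have hb := q3 v0 hv0
    rw [q1, PySem.Dict.getD_counter] at hb
    have hb' : ((v0 :: vt).count v0 : Int) < 0 ∨ (((v0 :: vt).count v0 : Int) = 0 ∧ v0 ≤ 0) := hb
    have hpos : 0 < (v0 :: vt).count v0 := List.count_pos_iff.mpr List.mem_cons_self
    omega
  · obtain ⟨hmem, heq⟩ := q1
    rw [PySem.Dict.getD_counter] at heq
    constructor
    · exact (PySem.Set.mem_ofList _ _).mp (by rw [← PySem.Dict.keys_counter]; exact hmem)
    · intro v hv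
      have hvk : v ∈ (PySem.Dict.counter (v0 :: vt)).keys := by
        rw [PySem.Dict.keys_counter]
        exact (PySem.Set.mem_ofList _ _).mpr hv
      have hb := q3 v hvk
      rw [PySem.Dict.getD_counter, heq] at hb
      exact hb

-- ---- B side: the run scan over the sorted column ----
-- loop invariant of B's scan after having consumed the sorted prefix p
def pvInv (p : List Int) (st : (Option Int × Int) × (Int × Int)) : Prop :=
  (p = [] ∧ st = ((none, 0), (0, 0))) ∨
  (∃ u, u ∈ p ∧ st.1.1 = some u ∧ (∀ x ∈ p, x ≤ u) ∧ st.1.2 = (p.count u : Int)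
    ∧ st.2.1 ∈ p ∧ st.2.2 = (p.count st.2.1 : Int)
    ∧ ∀ x ∈ p, (p.count x : Int) < st.2.2 ∨ ((p.count x : Int) = st.2.2 ∧ x ≤ st.2.1))

theorem pvScanStep_inv (p : List Int) (v : Int) (st : (Option Int × Int) × (Int × Int))
    (hle : ∀ x ∈ p, x ≤ v) (hinv : pvInv p st) : pvInv (p ++ [v]) (pvScanStep st v) := by
  have hcv : ∀ x, x ≠ v → ((p ++ [v]).count x : Int) = (p.count x : Int) := by
    intro x hx
    have h0 : List.count x [v] = 0 := by simp [List.count_eq_zero, hx]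
    rw [List.count_append, h0]
    simp
  have hcvv : ((p ++ [v]).count v : Int) = (p.count v : Int) + 1 := by
    rw [List.count_append]
    simp
  rcases hinv with ⟨rfl, rfl⟩ | ⟨u, hu, hcur, hmax, hrun, hbm, hbc, hbnd⟩
  · refine Or.inr ⟨v, by simp, ?_⟩
    simp [pvScanStep]
  · have hk : (if some v = st.1.1 then st.1.2 + 1 else 1) = ((p ++ [v]).count v : Int) := by
      rw [hcur]
      by_cases hvu : v = u
      · subst hvu
        rw [if_pos rfl, hrun, hcvv]
      · rw [if_neg (by simpa using hvu)]
        have hvp : v ∉ p := by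
          intro hvp
          exact hvu (le_antisymm (hmax v hvp) (hle u hu))
        rw [List.count_append, List.count_eq_zero.mpr hvp]
        simp
    have hmemv : v ∈ p ++ [v] := by simp
    unfold pvScanStep
    rw [hk]
    by_cases hge : ((p ++ [v]).count v : Int) ≥ st.2.2
    · rw [if_pos hge]
      refine Or.inr ⟨v, hmemv, rfl, ?_, by simp, hmemv, by simp, ?_⟩
      · intro x hx
        rcases List.mem_append.mp hx with hx | hx
        · exact hle x hx
        · simp only [List.mem_singleton] at hx; omega
      · intro x hx
        simp only
        rcases List.mem_append.mp hx with hx | hx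
        · by_cases hxv : x = v
          · subst hxv; exact Or.inr ⟨rfl, le_refl x⟩
          · rw [hcv x hxv]
            rcases hbnd x hx with h | h
            · exact Or.inl (by omega)
            · rcases lt_or_eq_of_le hge with hlt | heq
              · exact Or.inl (by omega)
              · exact Or.inr ⟨by omega, hle x hx⟩
        · simp only [List.mem_singleton] at hx
          subst hx
          exact Or.inr ⟨rfl, le_refl x⟩
    · rw [if_neg hge]
      have hbmv : st.2.1 ≠ v := by
        intro h
        rw [h] at hbc
        omega
      refine Or.inr ⟨v, hmemv, rfl, ?_, by simp, List.mem_append_left _ hbm, ?_, ?_⟩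
      · intro x hx
        rcases List.mem_append.mp hx with hx | hx
        · exact hle x hx
        · simp only [List.mem_singleton] at hx; omega
      · simp only
        rw [hcv _ hbmv]
        exact hbc
      · intro x hx
        simp only
        rcases List.mem_append.mp hx with hx | hx
        · by_cases hxv : x = v
          · subst hxv; exact Or.inl (by omega)
          · rw [hcv x hxv]; exact hbnd x hx
        · simp only [List.mem_singleton] at hx
          subst hx
          exact Or.inl (by omega)

theorem pvScan (rest : List Int) (p : List Int) (st : (Option Int × Int) × (Int × Int))
    (hs : (p ++ rest).Pairwise (· ≤ ·)) (hinv : pvInv p st) :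
    pvInv (p ++ rest) (rest.foldl pvScanStep st) := by
  induction rest generalizing p st with
  | nil => simpa using hinv
  | cons v t ih =>
      have hle : ∀ x ∈ p, x ≤ v :=
        fun x hx => (List.pairwise_append.mp hs).2.2 x hx v List.mem_cons_self
      have h1 : pvInv (p ++ [v]) (pvScanStep st v) := pvScanStep_inv p v st hle hinv
      have hs' : ((p ++ [v]) ++ t).Pairwise (· ≤ ·) := by simpa using hs
      have := ih (p ++ [v]) (pvScanStep st v) hs' h1
      simpa using this

theorem pvB_isMaj (s : List Int) (hs : s.Pairwise (· ≤ ·)) (hne : s ≠ []) :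
    pvIsMaj s ((s.foldl pvScanStep ((none, 0), (0, 0))).2.1) := by
  have := pvScan s [] ((none, 0), (0, 0)) (by simpa using hs) (Or.inl ⟨rfl, rfl⟩)
  simp only [List.nil_append] at this
  rcases this with ⟨h, -⟩ | ⟨u, -, -, -, -, hbm, hbc, hbnd⟩
  · exact absurd h hne
  · exact ⟨hbm, fun v hv => by have := hbnd v hv; omega⟩

-- A's counting loop over the rows IS Counter(column)
theorem pvCounterA (rows : List (PySem.Dict String Int)) (cat : String) :
    rows.foldl (fun values row =>
        if values.contains ((row.get? cat).getD 0) then values.modify ((row.get? cat).getD 0) 0 (· + 1)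
        else values.insert ((row.get? cat).getD 0) 1) PySem.Dict.empty
      = PySem.Dict.counter (rows.map (fun row => (row.get? cat).getD 0)) := by
  rw [PySem.Dict.counter_eq_foldl, List.foldl_map]
  apply PySem.List.foldl_congr_mem
  intro d row _
  by_cases h : d.contains ((row.get? cat).getD 0) = true
  · simp [h]
  · simp [h, PySem.Dict.modify, PySem.Dict.getD_of_not_contains d 0 (by simpa using h)]

-- the per-category value of port A equals that of port B (the lhs is defeq to A's loop body)
theorem pvCat (rows : List (PySem.Dict String Int)) (cat : String) (hne : rows ≠ []) :
    pvSelect (rows.foldl (fun values row =>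
        if values.contains ((row.get? cat).getD 0) then values.modify ((row.get? cat).getD 0) 0 (· + 1)
        else values.insert ((row.get? cat).getD 0) 1) PySem.Dict.empty)
    = ((PySem.List.sorted (rows.map (fun row => (row.get? cat).getD 0)) (fun v => v) false).foldl
        pvScanStep ((none, 0), (0, 0))).2.1 := by
  rw [pvCounterA rows cat]
  set vals := rows.map (fun row => (row.get? cat).getD 0) with hvals
  have hvne : vals ≠ [] := by simp [hvals, hne]
  have hAmaj := pvA_isMaj vals hvne
  set s := PySem.List.sorted vals (fun v => v) false with hsdef
  have hperm : s.Perm vals := PySem.List.sorted_perm vals (fun v => v) false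
  have hsp : s.Pairwise (· ≤ ·) := by
    have := PySem.List.sorted_pairwise vals (fun v => v)
    simpa [hsdef] using this
  have hsne : s ≠ [] := by
    intro h
    rw [hsdef, PySem.List.sorted_eq_nil_iff] at h
    exact hvne h
  have hBmaj := pvIsMaj_of_perm s vals _ hperm (pvB_isMaj s hsp hsne)
  exact pvIsMaj_unique vals _ _ hAmaj hBmaj

-- ===== VERDICT (by name: the statement is the Claim_ definition above) =====
theorem coalesce_by_majority_vote_py_spec : Claim_equal_coalesce_by_majority_vote_py := by
  intro data _ hpre
  unfold Spec_coalesce_by_majority_vote_py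
  rcases data with _ | ⟨d0, dt⟩
  · exact absurd rfl hpre.1
  unfold coalesce_by_majority_vote_py coalesce_by_majority_vote_py_alt
  apply congrArg PySem.Dict.items
  apply PySem.List.foldl_congr_mem
  intro acc cat _
  exact congrArg (fun z => acc.insert cat z)
    (pvCat (List.map PySem.Dict.ofList (d0 :: dt)) cat (by simp))
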